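-- pv_equiv track=rewrite | github.com/TreeMC-cloud/office-automation-toolkit | report-automation-bot/services/metrics.py | _detect_consecutive
-- ===== SOURCE A (Python) =====
-- def _detect_consecutive(values: list) -> tuple[str, int]:
--     """检测连续上升/下降"""
--     if len(values) < 2:
--         return "数据不足", 0
--
--     up_count, down_count = 0, 0
--     for i in range(len(values) - 1, 0, -1):
--         if values[i] > values[i - 1]:
--             up_count += 1
--         else:
--             break
--     for i in range(len(values) - 1, 0, -1):
--         if values[i] < values[i - 1]:
--             down_count += 1
--         else:
--             break
--
--     if up_count >= 3:
--         return f"连续上升 {up_count} 期", up_count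
--     if down_count >= 3:
--         return f"连续下降 {down_count} 期", down_count
--     if up_count > 0:
--         return "近期上升", up_count
--     if down_count > 0:
--         return "近期下降", down_count
--     return "持平", 0
-- ===== SOURCE B (Python) =====
-- def _detect_consecutive(values: list) -> tuple[str, int]:
--     """检测连续上升/下降"""
--     if len(values) < 2:
--         return "数据不足", 0
--
--     # Build the list of adjacent difference signs (+1 rise, -1 fall, 0 flat).
--     signs = [(b > a) - (b < a) for a, b in zip(values, values[1:])]
--     s = signs[-1]
--     if s == 0:
--         return "持平", 0
--
--     # Forward scan: remember the last position whose sign differs from s.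
--     last_break = -1
--     for j, x in enumerate(signs):
--         if x != s:
--             last_break = j
--     run = len(signs) - 1 - last_break
--
--     if run >= 3:
--         label = f"连续上升 {run} 期" if s > 0 else f"连续下降 {run} 期"
--     else:
--         label = "近期上升" if s > 0 else "近期下降"
--     return label, run
-- ===== Notes on version B (the rewrite author's own statement) =====
-- stated objective: alternative
-- what changed: A runs two backward break-on-failure scans over the values; B first materialises the list of adjacent difference signs (+1/0/-1), reads its last element to fix the direction, and finds the run length with a single forward scan that records the last index where the sign changes.
import Mathlib
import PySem

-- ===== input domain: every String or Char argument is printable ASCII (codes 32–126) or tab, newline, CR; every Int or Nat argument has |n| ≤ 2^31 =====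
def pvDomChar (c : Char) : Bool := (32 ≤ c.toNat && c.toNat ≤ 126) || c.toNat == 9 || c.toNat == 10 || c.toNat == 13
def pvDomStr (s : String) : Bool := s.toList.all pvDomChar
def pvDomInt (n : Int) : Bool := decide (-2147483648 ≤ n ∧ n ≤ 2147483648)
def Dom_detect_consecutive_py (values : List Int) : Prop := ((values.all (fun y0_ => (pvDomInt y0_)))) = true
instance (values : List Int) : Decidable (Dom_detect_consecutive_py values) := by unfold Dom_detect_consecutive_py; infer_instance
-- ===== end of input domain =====

-- B replaces A's two backward break-on-failure scans by building the adjacent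
-- difference-sign list once and finding the last sign change in a single forward
-- scan (objective: alternative decomposition, same cost).

-- ===== PORT A =====
-- A's first loop: for i in range(len-1, 0, -1): count while values[i] > values[i-1] else break
def runUpA (values : List Int) : Nat → Int
  | 0 => 0
  | Nat.succ i => if values.getD (i + 1) 0 > values.getD i 0 then runUpA values i + 1 else 0

-- A's second loop, with '<'
def runDownA (values : List Int) : Nat → Int
  | 0 => 0
  | Nat.succ i => if values.getD (i + 1) 0 < values.getD i 0 then runDownA values i + 1 else 0

def detect_consecutive_py (values : List Int) : String × Int :=
  if values.length < 2 then ("数据不足", 0)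
  else
    let up_count := runUpA values (values.length - 1)
    let down_count := runDownA values (values.length - 1)
    if up_count ≥ 3 then ("连续上升 " ++ PySem.Int.toStr up_count ++ " 期", up_count)
    else if down_count ≥ 3 then ("连续下降 " ++ PySem.Int.toStr down_count ++ " 期", down_count)
    else if up_count > 0 then ("近期上升", up_count)
    else if down_count > 0 then ("近期下降", down_count)
    else ("持平", 0)

-- ===== PORT B =====
-- (b > a) - (b < a) : the difference sign of one adjacent pair
def sgnB (a b : Int) : Int := (if b > a then 1 else 0) - (if b < a then 1 else 0)

-- [(b > a) - (b < a) for a, b in zip(values, values[1:])]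
def signsB (values : List Int) : List Int := (values.zip values.tail).map (fun p => sgnB p.1 p.2)

def detect_consecutive_py_alt (values : List Int) : String × Int :=
  if values.length < 2 then ("数据不足", 0)
  else
    let signs := signsB values
    let s := signs.getLastD 0
    if s = 0 then ("持平", 0)
    else
      -- forward scan over enumerate(signs); Lean's zipIdx pairs (x, j) where Python has (j, x)
      let last_break : Int := signs.zipIdx.foldl (fun acc p => if p.1 ≠ s then (p.2 : Int) else acc) (-1)
      let run : Int := (signs.length : Int) - 1 - last_break
      if run ≥ 3 then
        (if s > 0 then ("连续上升 " ++ PySem.Int.toStr run ++ " 期", run)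
         else ("连续下降 " ++ PySem.Int.toStr run ++ " 期", run))
      else
        (if s > 0 then ("近期上升", run) else ("近期下降", run))

-- ===== PRECONDITION & SPEC =====
def Spec_detect_consecutive_py (values : List Int) (out : String × Int) : Prop := out = detect_consecutive_py_alt values
instance (values : List Int) (out : String × Int) : Decidable (Spec_detect_consecutive_py values out) := by unfold Spec_detect_consecutive_py; infer_instance

-- ===== CLAIM (what is proved, stated in full; the proofs are below) =====
def Claim_equal_detect_consecutive_py : Prop := ∀ (values : List Int), Dom_detect_consecutive_py values → Spec_detect_consecutive_py values (detect_consecutive_py values)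

-- ===== LEMMAS AND PROOFS =====
theorem lb_run (s : Int) (l : List Int) :
    (l.length : Int) - 1 - l.zipIdx.foldl (fun acc p => if p.1 ≠ s then (p.2 : Int) else acc) (-1)
      = ((l.reverse.takeWhile (fun x => x = s)).length : Int) := by
  induction l using List.reverseRecOn with
  | nil => simp
  | append_singleton l x ih =>
    rw [List.zipIdx_append, List.foldl_append]
    simp only [List.zipIdx, List.length_append, List.reverse_append, List.foldl_cons, List.foldl_nil,
      List.length_cons, List.length_nil, Nat.zero_add]
    by_cases hx : x = s
    · simp only [hx, ne_eq, not_true_eq_false, if_false] at *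
      rw [show ([s].reverse ++ l.reverse) = s :: l.reverse by simp,
        List.takeWhile_cons_of_pos (by simp), List.length_cons]
      push_cast at ih ⊢
      omega
    · simp [hx]


theorem sgnB_eq_one (a b : Int) : sgnB a b = 1 ↔ a < b := by
  unfold sgnB; split_ifs <;> omega

theorem sgnB_eq_neg_one (a b : Int) : sgnB a b = -1 ↔ b < a := by
  unfold sgnB; split_ifs <;> omega

theorem sgnB_trichot (a b : Int) : sgnB a b = 1 ∨ sgnB a b = 0 ∨ sgnB a b = -1 := by
  unfold sgnB; split_ifs <;> omega

theorem signsB_length (values : List Int) : (signsB values).length = values.length - 1 := by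
  simp [signsB]

theorem signsB_getD (values : List Int) (i : Nat) (h : i + 1 < values.length) :
    (signsB values).getD i 0 = sgnB (values.getD i 0) (values.getD (i + 1) 0) := by
  have hsl : (signsB values).length = values.length - 1 := signsB_length values
  have hi : i < (signsB values).length := by omega
  have hz : i < (values.zip values.tail).length := by simp [signsB] at hi ⊢; omega
  have hv : i < values.length := by omega
  have ht : i < values.tail.length := by simp; omega
  rw [List.getD_eq_getElem _ _ hi, List.getD_eq_getElem _ _ hv, List.getD_eq_getElem _ _ h]
  simp [signsB, List.getElem_zip, List.getElem_tail]

theorem take_succ_getD (l : List Int) (i : Nat) (hi : i < l.length) :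
    l.take (i + 1) = l.take i ++ [l.getD i 0] := by
  rw [List.take_add_one, List.getElem?_eq_getElem hi, List.getD_eq_getElem l 0 hi]
  rfl

theorem runUp_eq (values : List Int) (i : Nat) (h : i ≤ (signsB values).length) :
    runUpA values i = ((((signsB values).take i).reverse.takeWhile (fun x => x = 1)).length : Int) := by
  induction i with
  | zero => simp [runUpA]
  | succ i ih =>
    have hsl : (signsB values).length = values.length - 1 := signsB_length values
    have h1 : i + 1 < values.length := by omega
    have hi : i < (signsB values).length := by omega
    rw [take_succ_getD _ _ hi, signsB_getD values i h1]
    simp only [List.reverse_append, List.reverse_cons, List.reverse_nil, List.nil_append,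
      List.singleton_append, List.takeWhile_cons]
    by_cases hgt : values.getD i 0 < values.getD (i + 1) 0
    · rw [(sgnB_eq_one _ _).mpr hgt]
      have e1 : runUpA values (i + 1) = runUpA values i + 1 := by
        simp only [runUpA]; rw [if_pos hgt]
      rw [e1, ih (by omega)]
      simp
    · have hne1 : sgnB (values.getD i 0) (values.getD (i + 1) 0) ≠ 1 := fun hq =>
        hgt ((sgnB_eq_one _ _).mp hq)
      have e0 : runUpA values (i + 1) = 0 := by
        simp only [runUpA]; rw [if_neg hgt]
      rw [e0]
      split_ifs with hc
      · exact (hne1 (of_decide_eq_true hc)).elim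
      · simp

theorem runDown_eq (values : List Int) (i : Nat) (h : i ≤ (signsB values).length) :
    runDownA values i = ((((signsB values).take i).reverse.takeWhile (fun x => x = -1)).length : Int) := by
  induction i with
  | zero => simp [runDownA]
  | succ i ih =>
    have hsl : (signsB values).length = values.length - 1 := signsB_length values
    have h1 : i + 1 < values.length := by omega
    have hi : i < (signsB values).length := by omega
    rw [take_succ_getD _ _ hi, signsB_getD values i h1]
    simp only [List.reverse_append, List.reverse_cons, List.reverse_nil, List.nil_append,
      List.singleton_append, List.takeWhile_cons]
    by_cases hlt : values.getD (i + 1) 0 < values.getD i 0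
    · rw [(sgnB_eq_neg_one _ _).mpr hlt]
      have e1 : runDownA values (i + 1) = runDownA values i + 1 := by
        simp only [runDownA]; rw [if_pos hlt]
      rw [e1, ih (by omega)]
      simp
    · have hne1 : sgnB (values.getD i 0) (values.getD (i + 1) 0) ≠ -1 := fun hq =>
        hlt ((sgnB_eq_neg_one _ _).mp hq)
      have e0 : runDownA values (i + 1) = 0 := by
        simp only [runDownA]; rw [if_neg hlt]
      rw [e0]
      split_ifs with hc
      · exact (hne1 (of_decide_eq_true hc)).elim
      · simp

theorem main_eq (values : List Int) :
    detect_consecutive_py values = detect_consecutive_py_alt values := by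
  by_cases hlen : values.length < 2
  · simp [detect_consecutive_py, detect_consecutive_py_alt, hlen]
  · have hsl : (signsB values).length = values.length - 1 := signsB_length values
    have hpos : 0 < (signsB values).length := by omega
    have hne : signsB values ≠ [] := by
      intro hnil; rw [hnil] at hpos; simp at hpos
    have hrne : (signsB values).reverse ≠ [] := by simpa using hne
    obtain ⟨a, t, ht⟩ : ∃ a t, (signsB values).reverse = a :: t := by
      cases hrec : (signsB values).reverse with
      | nil => exact absurd hrec hrne
      | cons a t => exact ⟨a, t, rfl⟩
    have hsa : (signsB values).getLastD 0 = a := by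
      have h1 : (signsB values).getLast? = some a := by rw [← List.head?_reverse, ht]; rfl
      simp [List.getLastD_eq_getLast?, h1]
    have hamem : a ∈ signsB values := by
      have : a ∈ (signsB values).reverse := by rw [ht]; exact List.mem_cons_self
      simpa using this
    have hacases : a = 1 ∨ a = 0 ∨ a = -1 := by
      obtain ⟨p, _, hp⟩ := List.mem_map.mp hamem
      rw [← hp]; exact sgnB_trichot p.1 p.2
    have hU : runUpA values (values.length - 1)
        = (((a :: t).takeWhile (fun x => x = 1)).length : Int) := by
      have := runUp_eq values (signsB values).length le_rfl
      rw [List.take_length, ht] at this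
      rw [← hsl]; exact this
    have hD : runDownA values (values.length - 1)
        = (((a :: t).takeWhile (fun x => x = -1)).length : Int) := by
      have := runDown_eq values (signsB values).length le_rfl
      rw [List.take_length, ht] at this
      rw [← hsl]; exact this
    have hR : ((signsB values).length : Int) - 1
          - (signsB values).zipIdx.foldl
              (fun acc p => if p.1 ≠ a then (p.2 : Int) else acc) (-1)
        = (((a :: t).takeWhile (fun x => x = a)).length : Int) := by
      have := lb_run a (signsB values)
      rw [ht] at this
      exact this
    simp only [detect_consecutive_py, detect_consecutive_py_alt, hlen, if_false]
    rcases hacases with ha | ha | ha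
    · -- last sign is +1: the trailing run is strictly increasing
      subst ha
      norm_num [List.takeWhile_cons] at hU hD hR
      rw [hsa, hU, hD]
      simp only [ne_eq, ite_not]
      rw [hR]
      split_ifs <;> first | rfl | omega
    · -- last sign is 0: flat ending
      subst ha
      norm_num [List.takeWhile_cons] at hU hD
      rw [hsa, hU, hD]
      split_ifs <;> first | rfl | omega
    · -- last sign is -1: the trailing run is strictly decreasing
      subst ha
      norm_num [List.takeWhile_cons] at hU hD hR
      rw [hsa, hU, hD]
      simp only [ne_eq, ite_not]
      rw [hR]
      split_ifs <;> first | rfl | omega | (exfalso; omega)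

-- ===== VERDICT (by name: the statement is the Claim_ definition above) =====
theorem detect_consecutive_py_spec : Claim_equal_detect_consecutive_py := by
  intro values _
  exact main_eq values
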